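-- pv_equiv track=rewrite | github.com/younism1/Checkio | MostWantedLetter.py | max_in_order
-- ===== SOURCE A (Python) =====
-- def max_in_order(char_list):
--     max_value = max(char_list.values())
--     max_char_list = []
--
--     for letter in char_list:
--         value = char_list.get(letter)
--         if value == max_value:
--             max_char_list.append(letter)
--
--     max_char_list.sort()
--
--     return max_char_list[0]
-- ===== SOURCE B (Python) =====
-- def max_in_order(char_list):
--     best = None
--     for letter, value in char_list.items():
--         if best is None or value > best[1]:
--             best = (letter, value)
--         elif value == best[1] and letter < best[0]:
--             best = (letter, value)
--     if best is None:
--         raise ValueError("max() arg is an empty sequence")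
--     return best[0]
-- ===== Notes on version B (the rewrite author's own statement) =====
-- stated objective: alternative
-- what changed: Replaced A's three phases (max of values, filter keys with that value, sort and take head) by one pass over items() keeping the running best value with the alphabetically smallest key on ties; measured ~1.4-1.5x but not confirmed faster.
import Mathlib
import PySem

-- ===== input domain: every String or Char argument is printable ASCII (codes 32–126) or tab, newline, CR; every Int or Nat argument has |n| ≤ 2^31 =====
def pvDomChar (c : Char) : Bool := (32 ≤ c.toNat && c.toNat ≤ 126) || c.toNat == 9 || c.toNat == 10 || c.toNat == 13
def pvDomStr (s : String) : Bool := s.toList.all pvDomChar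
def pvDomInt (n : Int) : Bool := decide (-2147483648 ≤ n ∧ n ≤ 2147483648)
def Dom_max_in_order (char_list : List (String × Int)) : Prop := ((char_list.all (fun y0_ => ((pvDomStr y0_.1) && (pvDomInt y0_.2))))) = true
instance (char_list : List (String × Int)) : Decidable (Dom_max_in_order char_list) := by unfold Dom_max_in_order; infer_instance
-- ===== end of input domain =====

-- B replaces A's three phases (max of values, filter keys, sort, take head) by one pass over
-- items() keeping the running best value with the alphabetically smallest key on ties.

-- ===== PORT A =====
-- max_value = max(char_list.values()); collect keys whose value equals it; sort; return [0].
def max_in_order (char_list : List (String × Int)) : String :=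
  let d := PySem.Dict.ofList char_list
  match PySem.List.max? d.values (fun v => v) with
  | none => ""   -- unreachable under Pre_: max() raises on an empty dict
  | some max_value =>
    let max_char_list := d.keys.foldl
      (fun acc letter => if d.get? letter == some max_value then acc ++ [letter] else acc)
      ([] : List String)
    ((PySem.List.pyGet? (PySem.List.sorted max_char_list (fun x => x) false) 0).getD "")

-- ===== PORT B =====
def pvBStep (best : Option (String × Int)) (p : String × Int) : Option (String × Int) :=
  match best with
  | none => some p
  | some (bc, bv) =>
    if p.2 > bv then some p
    else if p.2 = bv ∧ p.1 < bc then some p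
    else some (bc, bv)

def max_in_order_alt (char_list : List (String × Int)) : String :=
  let d := PySem.Dict.ofList char_list
  match d.items.foldl pvBStep none with
  | some best => best.1
  | none => ""   -- unreachable under Pre_: B raises ValueError on an empty dict

-- ===== PRECONDITION & SPEC =====
-- Pre_ excludes only the empty dict, on which A's max() and B's explicit raise both throw ValueError.
def Pre_max_in_order (char_list : List (String × Int)) : Prop := char_list ≠ []
instance (char_list : List (String × Int)) : Decidable (Pre_max_in_order char_list) := by
  unfold Pre_max_in_order; infer_instance

def pvWitness_max_in_order : (List (String × Int)) := [("a", 2), ("b", 2), ("c", 1)]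

def Spec_max_in_order (char_list : List (String × Int)) (out : String) : Prop := out = max_in_order_alt char_list
instance (char_list : List (String × Int)) (out : String) : Decidable (Spec_max_in_order char_list out) := by unfold Spec_max_in_order; infer_instance

-- ===== CLAIM (what is proved, stated in full; the proofs are below) =====
def Claim_equal_max_in_order : Prop := ∀ (char_list : List (String × Int)), Dom_max_in_order char_list → Pre_max_in_order char_list → Spec_max_in_order char_list (max_in_order char_list)

-- ===== LEMMAS AND PROOFS =====

-- r is a key of l carrying the maximal value, and alphabetically least among such keys.
def GoodBest (l : List (String × Int)) (r : String) : Prop :=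
  ∃ v, (r, v) ∈ l ∧ (∀ p ∈ l, p.2 ≤ v) ∧ (∀ p ∈ l, p.2 = v → r ≤ p.1)

theorem goodBest_unique {l : List (String × Int)} {r₁ r₂ : String}
    (h₁ : GoodBest l r₁) (h₂ : GoodBest l r₂) : r₁ = r₂ := by
  obtain ⟨v₁, hm₁, hmax₁, hmin₁⟩ := h₁
  obtain ⟨v₂, hm₂, hmax₂, hmin₂⟩ := h₂
  have hv : v₁ = v₂ := le_antisymm (hmax₂ _ hm₁) (hmax₁ _ hm₂)
  exact le_antisymm (hmin₁ _ hm₂ (by simp [hv])) (hmin₂ _ hm₁ (by simp [hv]))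

theorem items_ne_nil {char_list : List (String × Int)} (h : char_list ≠ []) :
    (PySem.Dict.ofList char_list).items ≠ [] := by
  intro hnil
  obtain ⟨p, rest, rfl⟩ := List.exists_cons_of_ne_nil h
  have hk : (PySem.Dict.ofList (p :: rest)).keys = PySem.Set.ofList ((p :: rest).map (·.1)) := by
    show (List.foldl (fun acc q => acc.insert q.1 q.2) PySem.Dict.empty (p :: rest)).keys = _
    rw [PySem.Dict.keys_foldl_insert_key (p :: rest) (·.1) (fun _ q => q.2) PySem.Dict.empty]
    exact PySem.Set.update_nil_left _
  have : p.1 ∈ (PySem.Dict.ofList (p :: rest)).keys := by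
    rw [hk]; exact (PySem.Set.mem_ofList _ _).mpr (by simp)
  rw [PySem.Dict.keys, hnil] at this
  simp at this

-- A's result satisfies GoodBest on the dict's items.
theorem a_good {char_list : List (String × Int)} (h : char_list ≠ []) :
    GoodBest (PySem.Dict.ofList char_list).items (max_in_order char_list) := by
  have hnodup : (PySem.Dict.ofList char_list).keys.Nodup := PySem.Dict.nodup_keys_ofList char_list
  have hne : (PySem.Dict.ofList char_list).items ≠ [] := items_ne_nil h
  simp only [max_in_order]
  set d := PySem.Dict.ofList char_list with hd
  cases hmx : PySem.List.max? d.values (fun v => v) with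
  | none =>
    exfalso
    have : d.values = [] := (PySem.List.max?_eq_none_iff _ _).mp hmx
    exact hne (List.map_eq_nil_iff.mp this)
  | some mv =>
    show GoodBest d.items ((PySem.List.pyGet? (PySem.List.sorted (d.keys.foldl
      (fun acc letter => if d.get? letter == some mv then acc ++ [letter] else acc)
      ([] : List String)) (fun x => x) false) 0).getD "")
    have hmem : mv ∈ d.values := PySem.List.max?_mem hmx
    have hmax : ∀ y ∈ d.values, y ≤ mv := PySem.List.max?_isMax hmx
    -- the filtered key list
    have hfold : d.keys.foldl
        (fun acc letter => if d.get? letter == some mv then acc ++ [letter] else acc)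
        ([] : List String)
        = (d.keys.filter (fun letter => d.get? letter == some mv)) := by
      have := PySem.List.foldl_append_if (fun letter => d.get? letter == some mv)
        (fun letter => letter) d.keys ([] : List String)
      simpa using this
    rw [hfold]
    set mcl := d.keys.filter (fun letter => d.get? letter == some mv) with hmcl
    -- mcl is nonempty
    obtain ⟨q, hq, hqv⟩ := List.exists_of_mem_map hmem
    have hqk : q.1 ∈ d.keys := List.mem_map_of_mem hq
    have hqget : d.get? q.1 = some mv := by
      have := PySem.Dict.get?_of_mem_items d (k := q.1) (v := q.2) (by simpa using hq) hnodup
      rw [this, hqv]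
    have hqm : q.1 ∈ mcl := by
      rw [hmcl, List.mem_filter]
      exact ⟨hqk, by simp [hqget]⟩
    have hsne : PySem.List.sorted mcl (fun x => x) false ≠ [] := by
      intro hc
      have := (PySem.List.sorted_eq_nil_iff mcl (fun x => x) false).mp hc
      rw [this] at hqm; simp at hqm
    obtain ⟨r, t, hrt⟩ := List.exists_cons_of_ne_nil hsne
    rw [hrt]
    rw [show PySem.List.pyGet? (r :: t) 0 = some r by simp [PySem.List.pyGet?, PySem.List.pyIdx?]]
    simp only [Option.getD_some]
    -- r is in mcl, hence a key with value mv
    have hrmcl : r ∈ mcl := by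
      rw [← PySem.List.mem_sorted mcl (fun x => x) false, hrt]; simp
    have hrget : d.get? r = some mv := by
      have := (List.mem_filter.mp (hmcl ▸ hrmcl)).2
      simpa using this
    refine ⟨mv, PySem.Dict.mem_items_of_get?_eq_some d hrget, ?_, ?_⟩
    · intro p hp
      exact hmax p.2 (List.mem_map_of_mem hp)
    · intro p hp hpv
      have hpget : d.get? p.1 = some mv := by
        have := PySem.Dict.get?_of_mem_items d (k := p.1) (v := p.2) (by simpa using hp) hnodup
        rw [this, hpv]
      have hpm : p.1 ∈ mcl := by
        rw [hmcl, List.mem_filter]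
        exact ⟨List.mem_map_of_mem hp, by simp [hpget]⟩
      exact PySem.List.key_head_sorted_le mcl (fun x => x) hrt p.1 hpm

-- B's fold invariant
theorem b_fold_inv (l : List (String × Int)) (bc : String) (bv : Int) :
    ∃ c v, l.foldl pvBStep (some (bc, bv)) = some (c, v)
      ∧ bv ≤ v ∧ (∀ p ∈ l, p.2 ≤ v)
      ∧ ((c = bc ∧ v = bv) ∨ (c, v) ∈ l)
      ∧ (v = bv → c ≤ bc)
      ∧ (∀ p ∈ l, p.2 = v → c ≤ p.1) := by
  induction l generalizing bc bv with
  | nil => exact ⟨bc, bv, rfl, le_refl _, by simp, Or.inl ⟨rfl, rfl⟩, fun _ => le_refl _, by simp⟩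
  | cons p l ih =>
    -- one step
    obtain ⟨pk, pv⟩ := p
    have hstep : ∃ bc' bv', pvBStep (some (bc, bv)) (pk, pv) = some (bc', bv')
        ∧ bv ≤ bv' ∧ pv ≤ bv'
        ∧ ((bc' = bc ∧ bv' = bv) ∨ (bc', bv') = (pk, pv))
        ∧ (bv' = bv → bc' ≤ bc) ∧ (bv' = pv → bc' ≤ pk) := by
      unfold pvBStep
      by_cases h1 : pv > bv
      · exact ⟨pk, pv, by simp [h1], le_of_lt h1, le_refl _, Or.inr rfl,
          fun hv => absurd hv.symm (ne_of_lt h1), fun _ => le_refl _⟩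
      · by_cases h2 : pv = bv ∧ pk < bc
        · exact ⟨pk, pv, by simp [h2.1, h2.2], le_of_eq h2.1.symm, le_refl _, Or.inr rfl,
            fun _ => le_of_lt h2.2, fun _ => le_refl _⟩
        · refine ⟨bc, bv, ?_, le_refl _, not_lt.mp h1, Or.inl ⟨rfl, rfl⟩,
            fun _ => le_refl _, fun hv => ?_⟩
          · simp only [if_neg h1, if_neg h2]
          · have hp2 : pv = bv := le_antisymm (not_lt.mp h1) (le_of_eq hv)
            have hnl : ¬ pk < bc := fun hlt => h2 ⟨hp2, hlt⟩
            exact not_lt.mp hnl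
    obtain ⟨bc', bv', hs, hle, hple, horig, hmin, hpmin⟩ := hstep
    obtain ⟨c, v, hf, hle', hall, horig', hmin', hall'⟩ := ih bc' bv'
    refine ⟨c, v, by rw [List.foldl_cons, hs]; exact hf, le_trans hle hle', ?_, ?_, ?_, ?_⟩
    · intro q hq
      rcases List.mem_cons.mp hq with rfl | hq'
      · exact le_trans hple hle'
      · exact hall q hq'
    · rcases horig' with ⟨rfl, rfl⟩ | hin
      · rcases horig with ⟨rfl, rfl⟩ | hp
        · exact Or.inl ⟨rfl, rfl⟩
        · exact Or.inr (by rw [hp]; simp)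
      · exact Or.inr (List.mem_cons_of_mem _ hin)
    · intro hv
      have hbv' : v = bv' := le_antisymm (by rw [hv]; exact hle) hle'
      exact le_trans (hmin' hbv') (hmin (hbv'.symm.trans hv))
    · intro q hq hqv
      rcases List.mem_cons.mp hq with rfl | hq'
      · have hbv' : v = bv' := le_antisymm (by rw [← hqv]; exact hple) hle'
        exact le_trans (hmin' hbv') (hpmin (hbv'.symm.trans hqv.symm))
      · exact hall' q hq' hqv

-- B's result satisfies GoodBest on the dict's items.
theorem b_good {char_list : List (String × Int)} (h : char_list ≠ []) :
    GoodBest (PySem.Dict.ofList char_list).items (max_in_order_alt char_list) := by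
  have hne : (PySem.Dict.ofList char_list).items ≠ [] := items_ne_nil h
  simp only [max_in_order_alt]
  set d := PySem.Dict.ofList char_list with hd
  obtain ⟨q, rest, hqr⟩ := List.exists_cons_of_ne_nil hne
  obtain ⟨qk, qv⟩ := q
  obtain ⟨c, v, hf, hle, hall, horig, hmin, hall'⟩ := b_fold_inv rest qk qv
  have hfold : d.items.foldl pvBStep none = some (c, v) := by
    rw [hqr, List.foldl_cons]
    exact hf
  show GoodBest d.items (match d.items.foldl pvBStep none with | some best => best.1 | none => "")
  rw [hfold]
  show GoodBest d.items c
  refine ⟨v, ?_, ?_, ?_⟩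
  · rcases horig with ⟨rfl, rfl⟩ | hin
    · rw [hqr]; simp
    · rw [hqr]; exact List.mem_cons_of_mem _ hin
  · intro p hp
    rw [hqr] at hp
    rcases List.mem_cons.mp hp with rfl | hp'
    · exact hle
    · exact hall p hp'
  · intro p hp hpv
    rw [hqr] at hp
    rcases List.mem_cons.mp hp with rfl | hp'
    · exact hmin hpv.symm
    · exact hall' p hp' hpv

-- ===== VERDICT (by name: the statement is the Claim_ definition above) =====
theorem max_in_order_spec : Claim_equal_max_in_order := by
  intro char_list _ hpre
  unfold Spec_max_in_order
  exact goodBest_unique (a_good hpre) (b_good hpre)
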